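-- pv_equiv track=rewrite | github.com/Rositsazz/CollectionCode | 101/leapyear.py | friday_years
-- ===== SOURCE A (Python) =====
-- from math import floor
--
-- def which_year(year):
--     is_leap = False
--     first_day = 0
--     if year % 4 == 0 and year % 100 != 0:
--         is_leap = True
--     century = (year // 100) % 4
--     if century == 0:
--         century = 6
--     elif century == 1:
--         century = 4
--     elif century == 2:
--         century = 2
--     else:
--         century = 0
--     if is_leap:
--         first_day = 7 + century + year % 100 + floor((year % 100) / 4)
--     else:
--         first_day = 1 + century + year % 100 + floor((year % 100) / 4)
--     first_day = first_day % 7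
--     return first_day
--
-- def friday_years(year1, year2):
--     result = 0
--     for year in range(year1, year2 + 1):
--         which = which_year(year)
--
--         is_leap = False
--         if year % 4 == 0 and year % 100 != 0:
--             is_leap = True
--         if (which == 4 and is_leap == True) or which == 5:
--             result += 1
--
--     return result
-- ===== SOURCE B (Python) =====
-- _CYCLE = 400
--
-- def _build_pref():
--     # _PREF[k] = number of r in [0, k) whose year satisfies the Friday condition
--     pref = [0]
--     total = 0
--     for r in range(_CYCLE):
--         leap = r % 4 == 0 and r % 100 != 0
--         century = (6, 4, 2, 0)[(r // 100) % 4]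
--         first_day = ((7 if leap else 1) + century + r % 100 + r % 100 // 4) % 7
--         if (first_day == 4 and leap) or first_day == 5:
--             total += 1
--         pref.append(total)
--     return pref
--
-- _PREF = _build_pref()
--
-- def friday_years(year1, year2):
--     if year1 > year2:
--         return 0
--     def upto(n):  # count of qualifying years in [0, n)
--         q, r = divmod(n, _CYCLE)
--         return q * _PREF[_CYCLE] + _PREF[r]
--     return upto(year2 + 1) - upto(year1)
-- ===== Notes on version B (the rewrite author's own statement) =====
-- stated objective: faster
-- what changed: Replaces A's year-by-year O(n) loop with O(1) arithmetic over the 400-year Gregorian cycle: a prefix-count table over one cycle is built once and the answer is a difference of two closed-form counts.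
import Mathlib
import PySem

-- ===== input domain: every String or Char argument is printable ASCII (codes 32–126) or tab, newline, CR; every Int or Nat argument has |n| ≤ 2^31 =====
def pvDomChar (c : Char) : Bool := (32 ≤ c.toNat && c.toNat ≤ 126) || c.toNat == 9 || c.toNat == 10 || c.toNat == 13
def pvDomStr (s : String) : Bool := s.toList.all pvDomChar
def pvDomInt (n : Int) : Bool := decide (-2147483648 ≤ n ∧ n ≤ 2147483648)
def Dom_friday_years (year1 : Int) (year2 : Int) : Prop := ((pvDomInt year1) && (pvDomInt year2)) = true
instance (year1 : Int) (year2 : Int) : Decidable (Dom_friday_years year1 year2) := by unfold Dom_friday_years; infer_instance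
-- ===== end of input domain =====

-- B replaces A's year-by-year loop with O(1) arithmetic on a prefix-count table over the
-- 400-year Gregorian cycle (objective: faster, asymptotic).

-- ===== PORT A =====
-- floor((year % 100) / 4) in Python is floor of a float, exact here since year % 100 ∈ [0,100):
-- ported as integer floor division.
def which_year (year : Int) : Int :=
  let is_leap : Bool := PySem.Int.mod year 4 == 0 && PySem.Int.mod year 100 != 0
  let century0 : Int := PySem.Int.mod (PySem.Int.floordiv year 100) 4
  let century : Int :=
    if century0 == 0 then 6
    else if century0 == 1 then 4
    else if century0 == 2 then 2
    else 0
  let first_day : Int :=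
    if is_leap then 7 + century + PySem.Int.mod year 100 + PySem.Int.floordiv (PySem.Int.mod year 100) 4
    else 1 + century + PySem.Int.mod year 100 + PySem.Int.floordiv (PySem.Int.mod year 100) 4
  PySem.Int.mod first_day 7

def friday_years (year1 : Int) (year2 : Int) : Int :=
  (PySem.List.pyRange year1 (year2 + 1) 1).foldl
    (fun result year =>
      let which := which_year year
      let is_leap : Bool := PySem.Int.mod year 4 == 0 && PySem.Int.mod year 100 != 0
      if (which == 4 && is_leap) || which == 5 then result + 1 else result)
    0

-- ===== PORT B =====
-- the per-residue predicate used while building the table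
def pvHit (r : Int) : Bool :=
  let leap : Bool := PySem.Int.mod r 4 == 0 && PySem.Int.mod r 100 != 0
  let century : Int := PySem.List.pyGetD [6, 4, 2, 0] (PySem.Int.mod (PySem.Int.floordiv r 100) 4) 0
  let first_day : Int :=
    PySem.Int.mod ((if leap then (7 : Int) else 1) + century + PySem.Int.mod r 100
      + PySem.Int.floordiv (PySem.Int.mod r 100) 4) 7
  (first_day == 4 && leap) || first_day == 5

-- _PREF: prefix counts over one 400-year cycle (state = (pref, total))
def pvPref : List Int :=
  ((PySem.List.pyRange 0 400 1).foldl
    (fun (st : List Int × Int) r =>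
      let total := if pvHit r then st.2 + 1 else st.2
      (st.1 ++ [total], total))
    ([0], 0)).1

-- upto n = count of qualifying years in [0, n); divmod(n, 400) with the fixed nonzero divisor 400
def pvUpto (n : Int) : Int :=
  let q := PySem.Int.floordiv n 400
  let r := PySem.Int.mod n 400
  q * PySem.List.pyGetD pvPref 400 0 + PySem.List.pyGetD pvPref r 0

def friday_years_alt (year1 : Int) (year2 : Int) : Int :=
  if year1 > year2 then 0
  else pvUpto (year2 + 1) - pvUpto year1

-- ===== PRECONDITION & SPEC =====
def Spec_friday_years (year1 : Int) (year2 : Int) (out : Int) : Prop := out = friday_years_alt year1 year2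
instance (year1 : Int) (year2 : Int) (out : Int) : Decidable (Spec_friday_years year1 year2 out) := by unfold Spec_friday_years; infer_instance

-- ===== CLAIM (what is proved, stated in full; the proofs are below) =====
def Claim_equal_friday_years : Prop := ∀ (year1 : Int) (year2 : Int), Dom_friday_years year1 year2 → Spec_friday_years year1 year2 (friday_years year1 year2)

-- ===== LEMMAS AND PROOFS =====

-- A's loop-body condition as a function
def pvCondA (y : Int) : Bool :=
  (which_year y == 4 && (PySem.Int.mod y 4 == 0 && PySem.Int.mod y 100 != 0)) || which_year y == 5

-- number of qualifying residues below k
def pvCnt (k : Nat) : Int := ((((List.range k).map (Nat.cast : Nat → Int)).countP pvHit : Nat) : Int)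

lemma pvHit_eq_condA (r : Int) : pvHit r = pvCondA r := by
  unfold pvHit pvCondA which_year
  have h0 : 0 ≤ PySem.Int.mod (PySem.Int.floordiv r 100) 4 := PySem.Int.mod_nonneg _ (by norm_num)
  have h1 : PySem.Int.mod (PySem.Int.floordiv r 100) 4 < 4 := PySem.Int.mod_lt _ (by norm_num)
  set c := PySem.Int.mod (PySem.Int.floordiv r 100) 4 with hc
  interval_cases c <;> simp [PySem.List.pyGetD] <;>
    rcases em (4 ∣ r ∧ ¬100 ∣ r) with h | h <;> simp [h]

lemma condA_period (y : Int) : pvCondA y = pvCondA (PySem.Int.mod y 400) := by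
  have h4 : PySem.Int.mod y 4 = PySem.Int.mod (PySem.Int.mod y 400) 4 := by
    rw [PySem.Int.mod_eq_emod_of_pos (by norm_num), PySem.Int.mod_eq_emod_of_pos (by norm_num),
        PySem.Int.mod_eq_emod_of_pos (by norm_num)]
    omega
  have h100 : PySem.Int.mod y 100 = PySem.Int.mod (PySem.Int.mod y 400) 100 := by
    rw [PySem.Int.mod_eq_emod_of_pos (by norm_num), PySem.Int.mod_eq_emod_of_pos (by norm_num),
        PySem.Int.mod_eq_emod_of_pos (by norm_num)]
    omega
  have hc : PySem.Int.mod (PySem.Int.floordiv y 100) 4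
      = PySem.Int.mod (PySem.Int.floordiv (PySem.Int.mod y 400) 100) 4 := by
    rw [PySem.Int.mod_eq_emod_of_pos (by norm_num), PySem.Int.mod_eq_emod_of_pos (by norm_num),
        PySem.Int.mod_eq_emod_of_pos (by norm_num),
        PySem.Int.floordiv_eq_ediv_of_pos (by norm_num), PySem.Int.floordiv_eq_ediv_of_pos (by norm_num)]
    omega
  unfold pvCondA which_year
  simp only [h4, h100, hc]

lemma pvCnt_succ (k : Nat) : pvCnt (k + 1) = pvCnt k + (if pvHit (k : Int) then 1 else 0) := by
  unfold pvCnt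
  rw [List.range_succ, List.map_append, List.countP_append]
  push_cast [List.countP_cons, List.countP_nil]
  split <;> simp_all

lemma pvPref_fold (m : Nat) :
    (PySem.List.pyRange 0 (m : Int) 1).foldl
      (fun (st : List Int × Int) r =>
        let total := if pvHit r then st.2 + 1 else st.2
        (st.1 ++ [total], total))
      ([0], 0)
    = ((List.range (m + 1)).map (fun k => pvCnt k), pvCnt m) := by
  induction m with
  | zero => simp [pvCnt]
  | succ m ih =>
    rw [PySem.List.pyRange_zero_nat] at ih ⊢
    rw [List.range_succ, List.map_append, List.foldl_append, ih]
    simp only [List.map_cons, List.map_nil, List.foldl_cons, List.foldl_nil]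
    have hrec := pvCnt_succ m
    by_cases hh : pvHit ((m : Nat) : Int) = true <;>
      simp [hh, List.range_succ (n := m + 1), hrec]

lemma pvPref_eq : pvPref = (List.range 401).map (fun k => pvCnt k) := by
  unfold pvPref
  have := pvPref_fold 400
  norm_num at this
  rw [this]

lemma pvPref_getD (k : Nat) (hk : k ≤ 400) :
    PySem.List.pyGetD pvPref (k : Int) 0 = pvCnt k := by
  rw [pvPref_eq, PySem.List.pyGetD_of_nonneg _ _ (by positivity)]
  rw [Int.toNat_natCast]
  exact PySem.List.getD_map_range _ _ _ _ (by omega)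

lemma pvUpto_succ (n : Int) :
    pvUpto (n + 1) = pvUpto n + (if pvCondA n then 1 else 0) := by
  have hcond : pvCondA n = pvHit (n % 400) := by
    rw [condA_period, pvHit_eq_condA, PySem.Int.mod_eq_emod_of_pos (by norm_num)]
  unfold pvUpto
  rw [PySem.Int.floordiv_eq_ediv_of_pos (a := n) (by norm_num),
      PySem.Int.floordiv_eq_ediv_of_pos (a := n + 1) (by norm_num),
      PySem.Int.mod_eq_emod_of_pos (a := n) (by norm_num),
      PySem.Int.mod_eq_emod_of_pos (a := n + 1) (by norm_num)]
  dsimp only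
  rw [hcond]
  by_cases hlast : n % 400 = 399
  · rw [(show (n + 1) / 400 = n / 400 + 1 by omega), (show (n + 1) % 400 = 0 by omega), hlast]
    have e399 : PySem.List.pyGetD pvPref (399 : Int) 0 = pvCnt 399 := by
      have := pvPref_getD 399 (by norm_num); push_cast at this; exact this
    have e400 : PySem.List.pyGetD pvPref (400 : Int) 0 = pvCnt 400 := by
      have := pvPref_getD 400 (by norm_num); push_cast at this; exact this
    have e0 : PySem.List.pyGetD pvPref (0 : Int) 0 = pvCnt 0 := by
      have := pvPref_getD 0 (by norm_num); push_cast at this; exact this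
    have h399 := pvCnt_succ 399
    push_cast at h399
    have hc0 : pvCnt 0 = 0 := by simp [pvCnt]
    rw [e399, e400, e0, hc0, h399]
    ring
  · have hr0 : 0 ≤ n % 400 := by omega
    set t : Nat := (n % 400).toNat with ht
    have htn : ((t : Nat) : Int) = n % 400 := by omega
    rw [(show (n + 1) / 400 = n / 400 by omega), (show (n + 1) % 400 = n % 400 + 1 by omega)]
    have er : PySem.List.pyGetD pvPref (n % 400) 0 = pvCnt t := by
      have := pvPref_getD t (by omega); rwa [htn] at this
    have er1 : PySem.List.pyGetD pvPref (n % 400 + 1) 0 = pvCnt (t + 1) := by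
      have := pvPref_getD (t + 1) (by omega)
      rwa [(show (((t + 1 : Nat) : Nat) : Int) = n % 400 + 1 by omega)] at this
    rw [er, er1, pvCnt_succ, htn]
    ring

lemma loop_eq (len : Nat) : ∀ (a acc : Int),
    (PySem.List.pyRange a (a + len) 1).foldl
      (fun result year =>
        let which := which_year year
        let is_leap : Bool := PySem.Int.mod year 4 == 0 && PySem.Int.mod year 100 != 0
        if (which == 4 && is_leap) || which == 5 then result + 1 else result)
      acc = acc + (pvUpto (a + len) - pvUpto a) := by
  induction len with
  | zero => intro a acc; rw [Int.natCast_zero, add_zero, PySem.List.pyRange_one_eq_nil le_rfl]; simp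
  | succ len ih =>
    intro a acc
    rw [PySem.List.pyRange_one_cons (by omega), List.foldl_cons]
    have harr : a + ((len + 1 : Nat) : Int) = (a + 1) + (len : Nat) := by push_cast; ring
    rw [harr, ih (a + 1)]
    have hstep := pvUpto_succ a
    have hbody : (if (which_year a == 4 && (PySem.Int.mod a 4 == 0 && PySem.Int.mod a 100 != 0)) || which_year a == 5
        then acc + 1 else acc) = acc + (if pvCondA a then 1 else 0) := by
      unfold pvCondA; split <;> simp_all
    simp only []
    rw [hbody]
    rw [hstep]
    ring

-- ===== VERDICT (by name: the statement is the Claim_ definition above) =====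
theorem friday_years_spec : Claim_equal_friday_years := by
  intro year1 year2 _
  unfold Spec_friday_years friday_years friday_years_alt
  by_cases h : year1 > year2
  · rw [PySem.List.pyRange_one_eq_nil (by omega)]
    simp [h]
  · have hle : year1 ≤ year2 + 1 := by omega
    have : year2 + 1 = year1 + ((year2 + 1 - year1).toNat : Int) := by omega
    rw [this, loop_eq]
    simp [h]
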